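-- pv_equiv track=rewrite | github.com/gitblanc/1-curso | 2º Cuatrimestre/Fundamentos/Ficheros.py | type_of_name
-- ===== SOURCE A (Python) =====
-- def how_many_words(line):
--     nombre_completo = line.split(", ")
--     nombre_completo_final = nombre_completo[1].split(" ")
--     cont=0
--     for i in nombre_completo_final:
--         cont+=1
--     return cont
--
-- def type_of_name(lines):
--     una = 0
--     dos = 0
--     tres = 0
--     cuatro = 0
--     cinco = 0
--     seis = 0
--     siete = 0
--
--     for i in lines:
--         if(how_many_words(i)) == 1:
--             una+=1
--         elif(how_many_words(i)) == 2:
--             dos+=1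
--         elif(how_many_words(i)) == 3:
--             tres+=1
--         elif(how_many_words(i)) == 4:
--             cuatro+=1
--         elif(how_many_words(i)) == 5:
--             cinco+=1
--         elif(how_many_words(i)) == 6:
--             seis+=1
--         else:
--             siete+=1
--
--     return una, dos, tres, cuatro, cinco, seis, siete
-- ===== SOURCE B (Python) =====
-- def how_many_words(line):
--     return len(line.split(", ")[1].split(" "))
--
-- def type_of_name(lines):
--     # staged passes: materialise all word counts once, then tally each bucket
--     ws = [how_many_words(line) for line in lines]
--     c = [ws.count(k) for k in range(1, 7)]
--     return (c[0], c[1], c[2], c[3], c[4], c[5], len(ws) - sum(c))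
-- ===== Notes on version B (the rewrite author's own statement) =====
-- stated objective: alternative
-- what changed: replaces A's single pass with a seven-way if/elif cascade (recomputing how_many_words up to six times per line) by staged passes: first materialise the list of word counts, then tally buckets 1..6 with list.count and obtain the last bucket as len minus the sum
import Mathlib
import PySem

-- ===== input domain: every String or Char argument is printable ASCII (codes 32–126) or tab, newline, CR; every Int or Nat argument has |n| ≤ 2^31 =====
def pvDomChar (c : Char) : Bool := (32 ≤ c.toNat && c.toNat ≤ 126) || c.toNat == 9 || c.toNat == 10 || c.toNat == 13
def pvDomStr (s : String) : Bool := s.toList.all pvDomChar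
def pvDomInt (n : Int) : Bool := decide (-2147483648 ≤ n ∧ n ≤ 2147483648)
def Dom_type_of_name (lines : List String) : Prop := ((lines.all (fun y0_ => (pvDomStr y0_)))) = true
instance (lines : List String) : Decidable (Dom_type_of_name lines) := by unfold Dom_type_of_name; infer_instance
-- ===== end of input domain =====

-- B replaces A's single pass with a seven-way if/elif cascade by staged passes:
-- first the list of word counts, then list.count per bucket, last bucket = len - sum (alternative).

-- ===== PORT A =====
-- how_many_words: split on ", ", take field 1 (none = IndexError), split on " ", count by loop
def howManyWordsA (line : String) : Option Int :=
  let nombre_completo := (PySem.Str.split? line ", ").getD []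
  match PySem.List.pyGet? nombre_completo 1 with
  | none => none
  | some part =>
    let nombre_completo_final := (PySem.Str.split? part " ").getD []
    some (nombre_completo_final.foldl (fun cont _ => cont + 1) (0 : Int))

def stepA (st : Int × Int × Int × Int × Int × Int × Int) (i : String) :
    Int × Int × Int × Int × Int × Int × Int :=
  let (una, dos, tres, cuatro, cinco, seis, siete) := st
  if howManyWordsA i = some 1 then (una + 1, dos, tres, cuatro, cinco, seis, siete)
  else if howManyWordsA i = some 2 then (una, dos + 1, tres, cuatro, cinco, seis, siete)
  else if howManyWordsA i = some 3 then (una, dos, tres + 1, cuatro, cinco, seis, siete)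
  else if howManyWordsA i = some 4 then (una, dos, tres, cuatro + 1, cinco, seis, siete)
  else if howManyWordsA i = some 5 then (una, dos, tres, cuatro, cinco + 1, seis, siete)
  else if howManyWordsA i = some 6 then (una, dos, tres, cuatro, cinco, seis + 1, siete)
  else (una, dos, tres, cuatro, cinco, seis, siete + 1)

def type_of_name (lines : List String) : Int × Int × Int × Int × Int × Int × Int :=
  lines.foldl stepA (0, 0, 0, 0, 0, 0, 0)

-- ===== PORT B =====
def howManyWordsB (line : String) : Option Int :=
  (PySem.List.pyGet? ((PySem.Str.split? line ", ").getD []) 1).map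
    (fun part => (((PySem.Str.split? part " ").getD []).length : Int))

def type_of_name_alt (lines : List String) : Int × Int × Int × Int × Int × Int × Int :=
  let ws : List Int := (lines.mapM howManyWordsB).getD []
  let c : List Int := (PySem.List.pyRange 1 7 1).map (fun k => (PySem.List.count ws k : Int))
  (c.getD 0 0, c.getD 1 0, c.getD 2 0, c.getD 3 0, c.getD 4 0, c.getD 5 0,
   (ws.length : Int) - c.sum)

-- ===== PRECONDITION & SPEC =====
-- Pre_ excludes lines that do not contain ", " (fewer than two ", "-fields): there
-- A raises IndexError in how_many_words, returning nothing to match.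
def Pre_type_of_name (lines : List String) : Prop :=
  ∀ s ∈ lines, 2 ≤ ((PySem.Str.split? s ", ").getD []).length
instance (lines : List String) : Decidable (Pre_type_of_name lines) := by
  unfold Pre_type_of_name; infer_instance

def pvWitness_type_of_name : List String :=
  ["Alice, Bob Smith", "x, John Ronald Reuel Tolkien", "y, Cher"]

def Spec_type_of_name (lines : List String) (out : Int × Int × Int × Int × Int × Int × Int) : Prop := out = type_of_name_alt lines
instance (lines : List String) (out : Int × Int × Int × Int × Int × Int × Int) : Decidable (Spec_type_of_name lines out) := by unfold Spec_type_of_name; infer_instance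

-- ===== CLAIM (what is proved, stated in full; the proofs are below) =====
def Claim_equal_type_of_name : Prop := ∀ (lines : List String), Dom_type_of_name lines → Pre_type_of_name lines → Spec_type_of_name lines (type_of_name lines)

-- ===== LEMMAS AND PROOFS =====

-- splitOn's worker never returns the empty list
theorem splitOn_go_ne_nil (sep : List Char) :
    ∀ (fuel : Nat) (l cur : List Char) (acc : List (List Char)),
      PySem.Chars.splitOn.go sep fuel l cur acc ≠ [] := by
  intro fuel
  induction fuel with
  | zero =>
    intro l cur acc
    rw [PySem.Chars.splitOn.go.eq_def]
    simp
  | succ n ih =>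
    intro l cur acc
    rw [PySem.Chars.splitOn.go.eq_def]
    cases l with
    | nil => simp
    | cons c rest =>
      by_cases h : sep.isPrefixOf (c :: rest) = true
      · simpa [h] using ih _ _ _
      · simpa [h] using ih _ _ _

theorem splitOn_ne_nil (s sep : List Char) : PySem.Chars.splitOn s sep ≠ [] := by
  rw [PySem.Chars.splitOn]; exact splitOn_go_ne_nil _ _ _ _ _

theorem split?_ne_nil (s sep : String) (h : sep ≠ "") :
    1 ≤ ((PySem.Str.split? s sep).getD []).length := by
  have hs : PySem.Str.split? s sep ≠ none := by
    unfold PySem.Str.split? PySem.Chars.split?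
    intro hc
    split at hc
    · rename_i he
      exact h (by
        have : sep.toList = [] := List.isEmpty_iff.mp he
        cases sep; simp_all)
    · simp at hc
  obtain ⟨parts, hp⟩ := Option.ne_none_iff_exists'.mp hs
  have hmap := PySem.Str.split?_map s sep
  rw [hp] at hmap
  unfold PySem.Chars.split? at hmap
  split at hmap
  · rename_i he
    exact absurd (by cases sep; simp_all : sep = "") h
  · simp only [Option.map_some, Option.some.injEq] at hmap
    have hne : PySem.Chars.splitOn s.toList sep.toList ≠ [] := splitOn_ne_nil _ _
    rw [← hmap] at hne
    simp only [hp, Option.getD_some]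
    have : parts ≠ [] := by intro hnil; exact hne (by simp [hnil])
    cases parts
    · exact absurd rfl this
    · simp

-- A's hand-counting loop is the length
theorem foldl_count (l : List String) (n : Int) :
    l.foldl (fun cont _ => cont + 1) n = n + l.length := by
  induction l generalizing n with
  | nil => simp
  | cons x xs ih => simp [List.foldl_cons, ih]; ring

theorem howManyWords_eq (line : String) : howManyWordsA line = howManyWordsB line := by
  unfold howManyWordsA howManyWordsB
  cases h : PySem.List.pyGet? ((PySem.Str.split? line ", ").getD []) 1 with
  | none => simp [h]
  | some part => simp [h, foldl_count]

-- under Pre_, how_many_words returns some w with 1 ≤ w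
theorem howManyWords_pos (line : String)
    (h : 2 ≤ ((PySem.Str.split? line ", ").getD []).length) :
    ∃ w : Int, howManyWordsB line = some w ∧ 1 ≤ w := by
  unfold howManyWordsB
  have hget : PySem.List.pyGet? ((PySem.Str.split? line ", ").getD []) 1 =
      ((PySem.Str.split? line ", ").getD [])[(1 : Nat)]? := by
    simpa using PySem.List.pyGet?_natCast ((PySem.Str.split? line ", ").getD []) 1
  have hlt : (1 : Nat) < ((PySem.Str.split? line ", ").getD []).length := h
  obtain ⟨part, hp⟩ : ∃ p, ((PySem.Str.split? line ", ").getD [])[(1 : Nat)]? = some p :=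
    ⟨_, List.getElem?_eq_getElem hlt⟩
  refine ⟨(((PySem.Str.split? part " ").getD []).length : Int), ?_, ?_⟩
  · rw [hget, hp]; simp
  · exact_mod_cast split?_ne_nil part " " (by decide)

-- main invariant: A's running tuple equals the per-bucket counts of the word-count list
theorem count_cons_int (w k : Int) (wsr : List Int) :
    (((w :: wsr).count k : Nat) : Int) = (wsr.count k : Int) + (if w = k then 1 else 0) := by
  by_cases hwk : w = k <;> simp [hwk]

theorem main_inv (lines : List String)
    (h : ∀ s ∈ lines, 2 ≤ ((PySem.Str.split? s ", ").getD []).length) :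
    ∃ ws : List Int, lines.mapM howManyWordsB = some ws ∧ (∀ w ∈ ws, 1 ≤ w) ∧
      ∀ a b c d e f g : Int,
        lines.foldl stepA (a, b, c, d, e, f, g) =
          (a + ws.count 1, b + ws.count 2, c + ws.count 3, d + ws.count 4,
           e + ws.count 5, f + ws.count 6,
           g + ((ws.length : Int) - ((ws.count 1 : Int) + ws.count 2 + ws.count 3 +
                 ws.count 4 + ws.count 5 + ws.count 6))) := by
  induction lines with
  | nil => exact ⟨[], rfl, by simp, by intro a b c d e f g; simp⟩
  | cons s rest ih =>
    obtain ⟨wsr, hmap, hpos, hfold⟩ :=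
      ih (fun t ht => h t (List.mem_cons_of_mem _ ht))
    obtain ⟨w, hw, hw1⟩ := howManyWords_pos s (h s (List.mem_cons_self ..))
    have hA : howManyWordsA s = some w := (howManyWords_eq s).trans hw
    refine ⟨w :: wsr, ?_, ?_, ?_⟩
    · simp [List.mapM_cons, hw, hmap]
    · intro x hx
      rcases List.mem_cons.mp hx with rfl | hx
      · exact hw1
      · exact hpos x hx
    · intro a b c d e f g
      simp only [List.foldl_cons]
      have hstep : stepA (a, b, c, d, e, f, g) s =
          (if w = 1 then (a + 1, b, c, d, e, f, g)
           else if w = 2 then (a, b + 1, c, d, e, f, g)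
           else if w = 3 then (a, b, c + 1, d, e, f, g)
           else if w = 4 then (a, b, c, d + 1, e, f, g)
           else if w = 5 then (a, b, c, d, e + 1, f, g)
           else if w = 6 then (a, b, c, d, e, f + 1, g)
           else (a, b, c, d, e, f, g + 1)) := by
        simp only [stepA, hA, Option.some.injEq]
      rw [hstep]
      have e1 := count_cons_int w 1 wsr
      have e2 := count_cons_int w 2 wsr
      have e3 := count_cons_int w 3 wsr
      have e4 := count_cons_int w 4 wsr
      have e5 := count_cons_int w 5 wsr
      have e6 := count_cons_int w 6 wsr
      have hlen : (((w :: wsr).length : Nat) : Int) = (wsr.length : Int) + 1 := by simp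
      split_ifs with h1 h2 h3 h4 h5 h6 <;>
        · rw [hfold]
          simp only [Prod.mk.injEq]
          refine ⟨?_, ?_, ?_, ?_, ?_, ?_, ?_⟩ <;>
            · rw [hlen] at *
              split_ifs at e1 e2 e3 e4 e5 e6 <;> omega

-- ===== VERDICT (by name: the statement is the Claim_ definition above) =====
theorem type_of_name_spec : Claim_equal_type_of_name := by
  intro lines _ hpre
  unfold Spec_type_of_name type_of_name type_of_name_alt
  obtain ⟨ws, hmap, _, hfold⟩ := main_inv lines hpre
  rw [hfold]
  simp only [hmap, Option.getD_some]
  norm_num [PySem.List.count_eq, PySem.List.pyRange, List.getD]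
  simp only [show Int.toNat 6 = 6 from rfl, List.range_succ, List.map_append, List.sum_append,
    List.map_cons, List.map_nil, List.sum_cons, List.sum_nil, Function.comp]
  norm_num
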